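-- pv_equiv track=rewrite | github.com/AnshulRoy28/DSA-Notes | LeetcodeProblems/Stack/Leetcode_1003_Word_Valid_After_Substitution.py | Valid_Word_Substitution
-- ===== SOURCE A (Python) =====
-- def Valid_Word_Substitution(s):
--     stack=[]
--
--     for i in s:
--         if i=='c':
--             if len(stack)>=2 and stack[-1]=='b' and stack[-2]=='a':
--                 stack.pop()
--                 stack.pop()
--             else:
--                 return False
--         else:
--             stack.append(i)
--
--     return len(stack)==0
-- ===== SOURCE B (Python) =====
-- def Valid_Word_Substitution(s):
--     while "abc" in s:
--         s = s.replace("abc", "")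
--     return s == ""
-- ===== Notes on version B (the rewrite author's own statement) =====
-- stated objective: simpler
-- what changed: Replaces the character-by-character stack pass with repeated whole-string removal of the substitution word via str.replace until none remains, returning whether the string is emptied; deletion of that word is confluent, so the outcome matches the stack reduction.
import Mathlib
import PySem

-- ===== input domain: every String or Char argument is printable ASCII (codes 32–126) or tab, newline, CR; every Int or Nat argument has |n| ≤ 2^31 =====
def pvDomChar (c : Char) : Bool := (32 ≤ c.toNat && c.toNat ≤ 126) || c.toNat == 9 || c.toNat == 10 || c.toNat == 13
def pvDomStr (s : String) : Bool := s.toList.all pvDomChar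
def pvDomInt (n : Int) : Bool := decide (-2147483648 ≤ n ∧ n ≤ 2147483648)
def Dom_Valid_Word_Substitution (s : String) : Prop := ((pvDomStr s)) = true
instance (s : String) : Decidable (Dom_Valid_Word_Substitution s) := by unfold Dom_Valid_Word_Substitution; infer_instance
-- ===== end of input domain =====

-- B replaces A's character-by-character stack pass with repeated whole-string removal of "abc"
-- (while "abc" in s: s = s.replace("abc", "")); a genuinely different algorithm, not faster.


-- ===== PORT A =====
-- A's for-loop; the stack is stored top-first (Python's append = cons, stack[-1] = [0]?,
-- stack[-2] = [1]?, pop();pop() = drop 2); none models the early 'return False'.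
def pvLoopA (stack : List Char) : List Char → Option (List Char)
  | [] => some stack
  | i :: rest =>
    if i = 'c' then
      if 2 ≤ stack.length ∧ stack[0]? = some 'b' ∧ stack[1]? = some 'a' then
        pvLoopA (stack.drop 2) rest
      else none
    else pvLoopA (i :: stack) rest

def Valid_Word_Substitution (s : String) : Bool :=
  match pvLoopA [] s.toList with
  | none => false
  | some stack => stack.length == 0

-- ===== PORT B =====
-- proof-side model of one pass of s.replace("abc", "") and of '"abc" in s';
-- pvRepl/pvHasABC and the lemmas up to pvReplace_length_lt are needed by pvLoopB's
-- termination proof (cited in its decreasing_by), so they sit above the port.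
def pvRepl : List Char → List Char
  | [] => []
  | c :: t =>
    if ['a', 'b', 'c'].isPrefixOf (c :: t) then pvRepl t.tail.tail
    else c :: pvRepl t
termination_by l => l.length
decreasing_by
  · simp [List.length_tail]; omega
  · simp

def pvHasABC : List Char → Bool
  | [] => false
  | c :: t => ['a', 'b', 'c'].isPrefixOf (c :: t) || pvHasABC t

theorem pvPrefixABC {c : Char} {t : List Char} (h : ['a', 'b', 'c'].isPrefixOf (c :: t) = true) :
    c = 'a' ∧ ∃ t₂, t = 'b' :: 'c' :: t₂ := by
  rw [List.isPrefixOf_iff_prefix] at h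
  obtain ⟨r, hr⟩ := h
  simp at hr
  exact ⟨hr.1.symm, r, hr.2.symm⟩

theorem pvRepl_length_le (l : List Char) : (pvRepl l).length ≤ l.length := by
  fun_induction pvRepl l with
  | case1 => simp
  | case2 c t h ih => simp only [List.length_tail, List.length_cons] at ih ⊢; omega
  | case3 c t h ih => simp only [List.length_cons]; omega

theorem pvRepl_length_lt (l : List Char) : pvHasABC l = true → (pvRepl l).length < l.length := by
  fun_induction pvRepl l with
  | case1 => intro h; simp [pvHasABC] at h
  | case2 c t h ih =>
    intro _
    have := pvRepl_length_le t.tail.tail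
    obtain ⟨rfl, t₂, rfl⟩ := pvPrefixABC h
    simp at this ⊢; omega
  | case3 c t h ih =>
    intro hm
    simp only [pvHasABC, Bool.or_eq_true] at hm
    have := ih (hm.resolve_left (by simpa using h))
    simp; omega

theorem pvHasABC_iff (l : List Char) : pvHasABC l = true ↔ ['a', 'b', 'c'] <:+: l := by
  induction l with
  | nil => simp [pvHasABC]
  | cons c t ih =>
    simp [pvHasABC, List.infix_cons_iff, ih, List.isPrefixOf_iff_prefix]

theorem pvReplace_eq_go (old new : List Char) (h : old ≠ []) (cs : List Char) :
    PySem.Chars.replace cs old new = PySem.Chars.replace.go old new cs.length cs [] := by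
  simp [PySem.Chars.replace, List.isEmpty_iff, h]

theorem pvGo_eq_repl (fuel : Nat) : ∀ (l acc : List Char), l.length ≤ fuel →
    PySem.Chars.replace.go ['a', 'b', 'c'] [] fuel l acc = acc.reverse ++ pvRepl l := by
  induction fuel with
  | zero =>
    intro l acc h
    have : l = [] := by cases l <;> simp_all
    subst this; simp [PySem.Chars.replace.go, pvRepl]
  | succ n ih =>
    intro l acc h
    cases l with
    | nil => simp [PySem.Chars.replace.go, pvRepl]
    | cons c t =>
      rw [PySem.Chars.replace.go]
      by_cases hp : ['a', 'b', 'c'].isPrefixOf (c :: t) = true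
      · obtain ⟨rfl, t₂, rfl⟩ := pvPrefixABC hp
        rw [if_pos hp, ih _ _ (by simp at h ⊢; omega)]
        simp [pvRepl]
      · rw [if_neg hp, ih _ _ (by simp at h ⊢; omega)]
        simp [pvRepl, hp]

theorem pvReplace_eq_repl (cs : List Char) :
    PySem.Chars.replace cs ['a', 'b', 'c'] [] = pvRepl cs := by
  rw [pvReplace_eq_go _ _ (by simp), pvGo_eq_repl _ _ _ le_rfl]; simp

-- termination lemma cited by pvLoopB's decreasing_by
theorem pvReplace_length_lt (cs : List Char)
    (h : PySem.Chars.isIn ['a', 'b', 'c'] cs = true) :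
    (PySem.Chars.replace cs ['a', 'b', 'c'] []).length < cs.length := by
  rw [pvReplace_eq_repl]
  exact pvRepl_length_lt cs ((pvHasABC_iff cs).mpr ((PySem.Chars.isIn_iff_infix _ _).mp h))

-- B's while loop: while "abc" in s: s = s.replace("abc", "")
def pvLoopB (cs : List Char) : List Char :=
  if h : PySem.Chars.isIn ['a', 'b', 'c'] cs = true then
    pvLoopB (PySem.Chars.replace cs ['a', 'b', 'c'] [])
  else cs
termination_by cs.length
decreasing_by exact pvReplace_length_lt cs h

def Valid_Word_Substitution_alt (s : String) : Bool := pvLoopB s.toList == []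

-- ===== PRECONDITION & SPEC =====
def Spec_Valid_Word_Substitution (s : String) (out : Bool) : Prop := out = Valid_Word_Substitution_alt s
instance (s : String) (out : Bool) : Decidable (Spec_Valid_Word_Substitution s out) := by unfold Spec_Valid_Word_Substitution; infer_instance

-- ===== CLAIM (what is proved, stated in full; the proofs are below) =====
def Claim_equal_Valid_Word_Substitution : Prop := ∀ (s : String), Dom_Valid_Word_Substitution s → Spec_Valid_Word_Substitution s (Valid_Word_Substitution s)

-- ===== LEMMAS AND PROOFS =====

-- removing one left-to-right "abc"-pass does not change A's stack reduction
theorem pvLoopA_repl (l : List Char) : ∀ st, pvLoopA st (pvRepl l) = pvLoopA st l := by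
  fun_induction pvRepl l with
  | case1 => intro st; rfl
  | case2 c t hp ih =>
    intro st
    obtain ⟨rfl, t₂, rfl⟩ := pvPrefixABC hp
    rw [ih st]
    simp [pvLoopA]
  | case3 c t hp ih =>
    intro st
    simp only [pvLoopA]
    split_ifs with h1 h2
    · exact ih _
    · rfl
    · exact ih _

theorem pvLoopA_append (x : List Char) : ∀ st y,
    pvLoopA st (x ++ y) = (pvLoopA st x).bind (fun st' => pvLoopA st' y) := by
  induction x with
  | nil => intro st y; rfl
  | cons c t ih =>
    intro st y
    simp only [List.cons_append, pvLoopA]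
    split_ifs <;> simp [ih]

theorem pvLoopA_noC (l : List Char) (h : 'c' ∉ l) : ∀ st,
    pvLoopA st l = some (l.reverse ++ st) := by
  induction l with
  | nil => intro st; rfl
  | cons c t ih =>
    intro st
    simp only [List.mem_cons, not_or] at h
    have hcc : ¬ c = 'c' := fun hh => h.1 hh.symm
    simp [pvLoopA, hcc, ih h.2]

theorem pvFirst_c_split (l : List Char) (h : 'c' ∈ l) :
    ∃ p q, l = p ++ 'c' :: q ∧ 'c' ∉ p := by
  induction l with
  | nil => simp at h
  | cons c t ih =>
    by_cases hc : c = 'c'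
    · exact ⟨[], t, by simp [hc], by simp⟩
    · have : 'c' ∈ t := by simp at h; tauto
      obtain ⟨p, q, rfl, hp⟩ := ih this
      exact ⟨c :: p, q, rfl, by simp [hp]; exact fun hh => hc hh.symm⟩

-- a nonempty word without an "abc" substring never reduces to the empty stack
theorem pvLoopA_noABC (l : List Char) (hne : l ≠ []) (h : pvHasABC l = false) :
    pvLoopA [] l ≠ some [] := by
  by_cases hc : 'c' ∈ l
  · obtain ⟨p, q, rfl, hp⟩ := pvFirst_c_split l hc
    rw [pvLoopA_append, pvLoopA_noC p hp]
    simp only [Option.bind_some, List.append_nil]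
    rcases hr : p.reverse with _ | ⟨b, _ | ⟨a, t⟩⟩
    · simp [pvLoopA]
    · simp [pvLoopA]
    · by_cases hba : b = 'b' ∧ a = 'a'
      · exfalso
        obtain ⟨rfl, rfl⟩ := hba
        have hpeq : p = t.reverse ++ ['a', 'b'] := by
          rw [← List.reverse_reverse p, hr]; simp
        have h2 : pvHasABC (p ++ 'c' :: q) = true := by
          rw [pvHasABC_iff, hpeq]
          exact ⟨t.reverse, q, by simp⟩
        exact absurd h2 (by simp [h])
      · simp [pvLoopA]
        intro hb ha
        exact absurd ⟨hb, ha⟩ hba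
  · rw [pvLoopA_noC l hc]
    simp [hne]

theorem pvLoopB_stack (l : List Char) : pvLoopA [] (pvLoopB l) = pvLoopA [] l := by
  fun_induction pvLoopB l with
  | case1 cs _h ih => rw [ih, pvReplace_eq_repl, pvLoopA_repl]
  | case2 cs _h => rfl

theorem pvLoopB_noABC (l : List Char) : pvHasABC (pvLoopB l) = false := by
  fun_induction pvLoopB l with
  | case1 cs _h ih => exact ih
  | case2 cs h =>
    rw [← Bool.not_eq_true, pvHasABC_iff, ← PySem.Chars.isIn_iff_infix]
    exact h

-- ===== VERDICT (by name: the statement is the Claim_ definition above) =====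
theorem Valid_Word_Substitution_spec : Claim_equal_Valid_Word_Substitution := by
  intro s _
  unfold Spec_Valid_Word_Substitution Valid_Word_Substitution Valid_Word_Substitution_alt
  have hstack := pvLoopB_stack s.toList
  cases hB : pvLoopB s.toList with
  | nil =>
    rw [hB] at hstack
    rw [← hstack]
    rfl
  | cons c t =>
    have hne : pvLoopA [] s.toList ≠ some [] := by
      rw [← hstack, hB]
      exact pvLoopA_noABC _ (by simp) (hB ▸ pvLoopB_noABC s.toList)
    match hA : pvLoopA [] s.toList with
    | none => simp
    | some st =>
      rw [hA] at hne
      have hst : st ≠ [] := fun hh => hne (by rw [hh])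
      simp [List.length_eq_zero_iff, hst]
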